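-- pv_equiv track=rewrite | github.com/carrdelling/AdventOfCode2016 | day3/gold.py | solve
-- ===== SOURCE A (Python) =====
-- def solve(data):
--
--     possible = 0
--
--     b0, b1, b2 = [], [], []
--
--     for a, b, c in data:
--
--         b0.append(a)
--         b1.append(b)
--         b2.append(c)
--
--         if len(b0) == 3:
--             possible += 1 if (sum(b0) - max(b0)) > max(b0) else 0
--             possible += 1 if (sum(b1) - max(b1)) > max(b1) else 0
--             possible += 1 if (sum(b2) - max(b2)) > max(b2) else 0
--
--             b0, b1, b2 = [], [], []
--
--     solution = possible
--
--     return solution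
-- ===== SOURCE B (Python) =====
-- def solve(data):
--     def count_col(col):
--         if len(col) < 3:
--             return 0
--         x, y, z = sorted(col[:3])
--         return int(x + y > z) + count_col(col[3:])
--
--     c0 = [r[0] for r in data]
--     c1 = [r[1] for r in data]
--     c2 = [r[2] for r in data]
--
--     return count_col(c0) + count_col(c1) + count_col(c2)
-- ===== Notes on version B (the rewrite author's own statement) =====
-- stated objective: alternative
-- what changed: B is column-major and recursive: it first materialises the three full columns, then a recursive helper consumes each column three at a time, sorting each triple and testing x + y > z, instead of A's single row-wise pass over three mutable buffers with a reset-on-three counter and a sum-minus-max test.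
import Mathlib
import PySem

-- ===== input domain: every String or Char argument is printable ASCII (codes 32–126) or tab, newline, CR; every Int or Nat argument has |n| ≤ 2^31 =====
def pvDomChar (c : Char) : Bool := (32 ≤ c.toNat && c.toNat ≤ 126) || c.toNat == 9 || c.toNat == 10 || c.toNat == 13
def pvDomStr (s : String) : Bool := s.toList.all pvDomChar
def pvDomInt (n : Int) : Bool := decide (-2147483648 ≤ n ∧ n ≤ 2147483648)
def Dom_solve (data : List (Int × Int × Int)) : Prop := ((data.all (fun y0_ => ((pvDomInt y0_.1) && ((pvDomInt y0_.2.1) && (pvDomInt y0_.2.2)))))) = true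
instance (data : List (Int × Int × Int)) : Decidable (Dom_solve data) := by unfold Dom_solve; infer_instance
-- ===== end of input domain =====

-- B works column-major: it materialises the three full columns, then a recursive helper
-- consumes each column three at a time, sorting each triple and testing x + y > z —
-- instead of A's single row pass with three mutable buffers; objective: alternative (same cost).

-- ===== PORT A =====
-- `1 if (sum(b) - max(b)) > max(b) else 0` for a nonempty buffer b
def triA (l : List Int) : Int :=
  if l.sum - ((PySem.List.max? l (fun x => x)).getD 0) > ((PySem.List.max? l (fun x => x)).getD 0)
  then 1 else 0

-- one iteration of A's `for a, b, c in data` loop over state (possible, b0, b1, b2)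
def stepA (st : Int × List Int × List Int × List Int) (row : Int × Int × Int) :
    Int × List Int × List Int × List Int :=
  let (possible, b0, b1, b2) := st
  let b0 := b0 ++ [row.1]
  let b1 := b1 ++ [row.2.1]
  let b2 := b2 ++ [row.2.2]
  if b0.length = 3 then
    (possible + triA b0 + triA b1 + triA b2, [], [], [])
  else
    (possible, b0, b1, b2)

def solve (data : List (Int × Int × Int)) : Int :=
  (data.foldl stepA (0, [], [], [])).1

-- ===== PORT B =====
-- recursive `count_col`: `x, y, z = sorted(col[:3]); int(x + y > z) + count_col(col[3:])`
-- (the unpacking of `sorted` is ported as a match; its non-3-element arm is unreachable)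
def countCol : List Int → Int
  | x :: y :: z :: rest =>
      (match PySem.List.sorted [x, y, z] (fun v => v) false with
       | [a, b, c] => if a + b > c then (1 : Int) else 0
       | _ => 0) + countCol rest
  | _ => 0

def solve_alt (data : List (Int × Int × Int)) : Int :=
  countCol (data.map (fun r => r.1)) + countCol (data.map (fun r => r.2.1))
    + countCol (data.map (fun r => r.2.2))

-- ===== PRECONDITION & SPEC =====
def Spec_solve (data : List (Int × Int × Int)) (out : Int) : Prop := out = solve_alt data
instance (data : List (Int × Int × Int)) (out : Int) : Decidable (Spec_solve data out) := by unfold Spec_solve; infer_instance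

-- ===== CLAIM =====
def Claim_equal_solve : Prop := ∀ (data : List (Int × Int × Int)), Dom_solve data → Spec_solve data (solve data)

-- ===== LEMMAS AND PROOFS =====

-- B's sorted-triple test agrees with A's sum-minus-max test on a 3-element buffer
lemma sortTest_eq_triA (x y z : Int) :
    (match PySem.List.sorted [x, y, z] (fun v => v) false with
     | [a, b, c] => if a + b > c then (1 : Int) else 0
     | _ => 0) = triA [x, y, z] := by
  simp only [triA, PySem.List.max?_id_cons, List.foldl, Option.getD_some,
    List.sum_cons, List.sum_nil, add_zero]
  rcases le_total x y with h1 | h1 <;> rcases le_total y z with h2 | h2 <;>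
    rcases le_total x z with h3 | h3
  · rw [PySem.List.sorted_id_eq_of_perm_of_pairwise [x, y, z] [x, y, z]
      (List.Perm.refl _) (by simp [List.pairwise_cons]; omega)]
    simp only [max_def]; split_ifs <;> omega
  · rw [PySem.List.sorted_id_eq_of_perm_of_pairwise [x, y, z] [x, y, z]
      (List.Perm.refl _) (by simp [List.pairwise_cons]; omega)]
    simp only [max_def]; split_ifs <;> omega
  · rw [PySem.List.sorted_id_eq_of_perm_of_pairwise [x, y, z] [x, z, y]
      (List.Perm.cons x (List.Perm.swap y z [])) (by simp [List.pairwise_cons]; omega)]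
    simp only [max_def]; split_ifs <;> omega
  · rw [PySem.List.sorted_id_eq_of_perm_of_pairwise [x, y, z] [z, x, y]
      ((List.Perm.swap x z [y]).trans (List.Perm.cons x (List.Perm.swap y z [])))
      (by simp [List.pairwise_cons]; omega)]
    simp only [max_def]; split_ifs <;> omega
  · rw [PySem.List.sorted_id_eq_of_perm_of_pairwise [x, y, z] [y, x, z]
      (List.Perm.swap x y [z]) (by simp [List.pairwise_cons]; omega)]
    simp only [max_def]; split_ifs <;> omega
  · rw [PySem.List.sorted_id_eq_of_perm_of_pairwise [x, y, z] [y, z, x]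
      ((List.Perm.cons y (List.Perm.swap x z [])).trans (List.Perm.swap x y [z]))
      (by simp [List.pairwise_cons]; omega)]
    simp only [max_def]; split_ifs <;> omega
  · rw [PySem.List.sorted_id_eq_of_perm_of_pairwise [x, y, z] [z, y, x]
      (by simpa using List.reverse_perm [x, y, z]) (by simp [List.pairwise_cons]; omega)]
    simp only [max_def]; split_ifs <;> omega
  · rw [PySem.List.sorted_id_eq_of_perm_of_pairwise [x, y, z] [z, y, x]
      (by simpa using List.reverse_perm [x, y, z]) (by simp [List.pairwise_cons]; omega)]
    simp only [max_def]; split_ifs <;> omega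

theorem key (data : List (Int × Int × Int)) (p : Int) :
    (data.foldl stepA (p, [], [], [])).1
      = p + countCol (data.map (fun r => r.1)) + countCol (data.map (fun r => r.2.1))
          + countCol (data.map (fun r => r.2.2)) := by
  match data with
  | [] => simp [countCol]
  | [r1] => simp [List.foldl, stepA, countCol]
  | [r1, r2] => simp [List.foldl, stepA, countCol]
  | r1 :: r2 :: r3 :: rest =>
      have ih := key rest (p + triA [r1.1, r2.1, r3.1] + triA [r1.2.1, r2.2.1, r3.2.1]
        + triA [r1.2.2, r2.2.2, r3.2.2])
      have hstate : stepA (stepA (stepA (p, [], [], []) r1) r2) r3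
          = (p + triA [r1.1, r2.1, r3.1] + triA [r1.2.1, r2.2.1, r3.2.1]
              + triA [r1.2.2, r2.2.2, r3.2.2], [], [], []) := by
        simp only [stepA, List.nil_append, List.length_cons, List.length_nil]
        norm_num
      calc ((r1 :: r2 :: r3 :: rest).foldl stepA (p, [], [], [])).1
          = (rest.foldl stepA (stepA (stepA (stepA (p, [], [], []) r1) r2) r3)).1 := by
            simp [List.foldl_cons]
        _ = _ := by
            rw [hstate, ih]
            simp only [List.map_cons, countCol, sortTest_eq_triA]
            ring

-- ===== VERDICT =====
theorem solve_spec : Claim_equal_solve := by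
  intro data _
  unfold Spec_solve solve solve_alt
  rw [key data 0]
  ring
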